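-- pv_equiv track=rewrite | github.com/vhmvd/python | Projects/Gene manipulation/project_01.py | one_frame
-- ===== SOURCE A (Python) =====
-- def get_orf(seq):
--     ''' describe function here '''
--     stop_codons = ['TAG', 'TAA', 'TGA']
--     itr = 0
--     while itr < len(seq):
--         if seq[itr:itr+3] in stop_codons:
--             return seq[0:itr]
--         else:
--             itr += 3
--     return seq
--
-- def one_frame(seq):
--     ''' describe function here '''
--     start_codon = 'ATG'
--     orf = []
--     itr = 0
--     while itr < len(seq):
--         if seq[itr:itr+3] == start_codon:
--             orf.append(get_orf(seq[itr:len(seq)]))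
--         itr += 3
--     return orf
-- ===== SOURCE B (Python) =====
-- def one_frame(seq):
--     ''' describe function here '''
--     stop_codons = ('TAG', 'TAA', 'TGA')
--     n = len(seq)
--     ns = n  # position of the nearest in-frame stop codon at or after the cursor
--     res = []
--     i = ((n - 1) // 3) * 3
--     while i >= 0:
--         codon = seq[i:i+3]
--         if codon in stop_codons:
--             ns = i
--         elif codon == 'ATG':
--             res.append(seq[i:ns])
--         i -= 3
--     res.reverse()
--     return res
-- ===== Notes on version B (the rewrite author's own statement) =====
-- stated objective: alternative
-- what changed: Replaces the per-ATG forward rescan (get_orf) with a single backward codon-aligned pass that tracks the position of the nearest in-frame stop codon, emitting each ORF as one slice; it trades the nested scan for a reversed accumulator.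
import Mathlib
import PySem

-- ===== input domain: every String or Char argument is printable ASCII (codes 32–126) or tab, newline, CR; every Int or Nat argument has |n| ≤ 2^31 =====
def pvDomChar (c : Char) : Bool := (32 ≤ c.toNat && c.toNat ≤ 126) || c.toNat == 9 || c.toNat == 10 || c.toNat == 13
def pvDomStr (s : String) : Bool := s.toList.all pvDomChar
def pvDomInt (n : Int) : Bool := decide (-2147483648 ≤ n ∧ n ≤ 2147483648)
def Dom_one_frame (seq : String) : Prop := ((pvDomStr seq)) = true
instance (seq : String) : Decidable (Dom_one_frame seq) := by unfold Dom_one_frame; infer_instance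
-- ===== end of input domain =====

-- B replaces the per-ATG forward rescan (get_orf) by a single backward codon-aligned pass
-- tracking the nearest in-frame stop position; same return value, alternative algorithm.
-- Slices seq[a:b] here always have 0 ≤ a ≤ b (b clamped at the end), so they are ported
-- exactly as (drop a).take (b-a) over the character list.

-- ===== PORT A =====
def pvStops : List (List Char) := [['T','A','G'], ['T','A','A'], ['T','G','A']]

-- get_orf: while itr < len: if seq[itr:itr+3] in stop_codons: return seq[0:itr]; itr += 3; return seq
def pvGetOrfLoop (s : List Char) (itr : Nat) : List Char :=
  if itr < s.length then
    if (s.drop itr).take 3 ∈ pvStops then s.take itr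
    else pvGetOrfLoop s (itr + 3)
  else s
termination_by s.length - itr

-- one_frame: while itr < len: if seq[itr:itr+3] == 'ATG': orf.append(get_orf(seq[itr:len])); itr += 3
def pvALoop (s : List Char) (itr : Nat) (orf : List (List Char)) : List (List Char) :=
  if itr < s.length then
    pvALoop s (itr + 3)
      (if (s.drop itr).take 3 = ['A','T','G'] then orf ++ [pvGetOrfLoop (s.drop itr) 0] else orf)
  else orf
termination_by s.length - itr

def one_frame (seq : String) : List String :=
  (pvALoop seq.toList 0 []).map (fun cs => String.ofList cs)

-- ===== PORT B =====
-- backward pass: i = ((n-1)//3)*3; while i >= 0: codon = seq[i:i+3];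
--   if codon in stops: ns = i; elif codon == 'ATG': res.append(seq[i:ns]); i -= 3; finally res.reverse()
-- (for n = 0 the initial i is -3 and the loop body never runs: that is the `if n = 0` branch)
def pvBLoop (s : List Char) (i ns : Nat) (res : List (List Char)) : List (List Char) :=
  let c := (s.drop i).take 3
  let ns' := if c ∈ pvStops then i else ns
  let res' := if c = ['A','T','G'] then res ++ [(s.drop i).take (ns - i)] else res
  if i = 0 then res' else pvBLoop s (i - 3) ns' res'
termination_by i

def one_frame_alt (seq : String) : List String :=
  let s := seq.toList
  let n := s.length
  if n = 0 then []
  else ((pvBLoop s (((n - 1) / 3) * 3) n []).reverse).map (fun cs => String.ofList cs)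

-- ===== PRECONDITION & SPEC =====
def Spec_one_frame (seq : String) (out : List String) : Prop := out = one_frame_alt seq
instance (seq : String) (out : List String) : Decidable (Spec_one_frame seq out) := by unfold Spec_one_frame; infer_instance

-- ===== CLAIM (what is proved, stated in full; the proofs are below) =====
def Claim_equal_one_frame : Prop := ∀ (seq : String), Dom_one_frame seq → Spec_one_frame seq (one_frame seq)

-- ===== LEMMAS AND PROOFS =====

-- position of the first in-frame stop codon at or after i (s.length if none)
def pvFstop (s : List Char) (i : Nat) : Nat :=
  if i < s.length then
    if (s.drop i).take 3 ∈ pvStops then i else pvFstop s (i + 3)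
  else s.length
termination_by s.length - i

-- the (zero or one) ORF starting at position i
def pvAt (s : List Char) (i : Nat) : List (List Char) :=
  if (s.drop i).take 3 = ['A','T','G'] then [(s.drop i).take (pvFstop s i - i)] else []

-- ORFs at positions 3*0, 3*1, …, 3*k, in order
def pvUpTo (s : List Char) : Nat → List (List Char)
  | 0 => pvAt s 0
  | k + 1 => pvUpTo s k ++ pvAt s (3 * (k + 1))

-- ORFs at positions i, i+3, …
def pvFrom (s : List Char) (i : Nat) : List (List Char) :=
  if i < s.length then pvAt s i ++ pvFrom s (i + 3) else []
termination_by s.length - i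

theorem pvFstop_of_ge (s : List Char) (i : Nat) (h : ¬ i < s.length) :
    pvFstop s i = s.length := by
  rw [pvFstop, if_neg h]

theorem pvAt_reverse (s : List Char) (i : Nat) : (pvAt s i).reverse = pvAt s i := by
  unfold pvAt; split <;> rfl

theorem pvGetOrfLoop_eq (s : List Char) (i j : Nat) :
    pvGetOrfLoop (s.drop i) j = (s.drop i).take (pvFstop s (i + j) - i) := by
  suffices H : ∀ n j, s.length - (i + j) ≤ n →
      pvGetOrfLoop (s.drop i) j = (s.drop i).take (pvFstop s (i + j) - i) from
    H _ j le_rfl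
  intro n
  induction n with
  | zero =>
    intro j hj
    have h1 : ¬ j < (s.drop i).length := by simp; omega
    have h2 : ¬ i + j < s.length := by omega
    rw [pvGetOrfLoop, if_neg h1, pvFstop_of_ge s _ h2]
    rw [List.take_of_length_le (by simp)]
  | succ n ih =>
    intro j hj
    by_cases h1 : j < (s.drop i).length
    · have hl : (s.drop i).length = s.length - i := by simp
      have h2 : i + j < s.length := by omega
      have hc : ((s.drop i).drop j).take 3 = (s.drop (i + j)).take 3 := by
        rw [List.drop_drop]
      rw [pvGetOrfLoop, if_pos h1, hc]
      conv_rhs => rw [pvFstop, if_pos h2]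
      by_cases hs : (s.drop (i + j)).take 3 ∈ pvStops
      · rw [if_pos hs, if_pos hs]
        congr 1
        omega
      · rw [if_neg hs, if_neg hs]
        rw [ih (j + 3) (by omega)]
        have ha : i + (j + 3) = i + j + 3 := by omega
        rw [ha]
    · have h2 : ¬ i + j < s.length := by simp at h1; omega
      rw [pvGetOrfLoop, if_neg h1, pvFstop_of_ge s _ h2]
      rw [List.take_of_length_le (by simp)]

theorem pvALoop_eq (s : List Char) (i : Nat) (orf : List (List Char)) :
    pvALoop s i orf = orf ++ pvFrom s i := by
  suffices H : ∀ n i orf, s.length - i ≤ n → pvALoop s i orf = orf ++ pvFrom s i from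
    H _ i orf le_rfl
  intro n
  induction n with
  | zero =>
    intro i orf hi
    have h : ¬ i < s.length := by omega
    rw [pvALoop, if_neg h, pvFrom, if_neg h, List.append_nil]
  | succ n ih =>
    intro i orf hi
    by_cases h : i < s.length
    · rw [pvALoop, if_pos h, pvFrom, if_pos h, ih (i + 3) _ (by omega)]
      have horf : pvGetOrfLoop (s.drop i) 0 = (s.drop i).take (pvFstop s i - i) := by
        have := pvGetOrfLoop_eq s i 0
        simpa using this
      unfold pvAt
      split <;> simp [horf]
    · rw [pvALoop, if_neg h, pvFrom, if_neg h, List.append_nil]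

theorem pvAtg_not_stop : ¬ (['A','T','G'] : List Char) ∈ pvStops := by decide

theorem pvBLoop_eq (s : List Char) :
    ∀ (k : Nat) (res : List (List Char)), 3 * k < s.length →
      pvBLoop s (3 * k) (pvFstop s (3 * k + 3)) res = res ++ (pvUpTo s k).reverse := by
  intro k
  induction k with
  | zero =>
    intro res hk
    have h0 : (0:Nat) < s.length := by omega
    rw [pvBLoop]
    simp only [Nat.mul_zero, Nat.zero_add, if_true, Nat.sub_zero]
    rw [show pvUpTo s 0 = pvAt s 0 from rfl, pvAt_reverse]
    unfold pvAt
    by_cases ha : (s.drop 0).take 3 = ['A','T','G']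
    · have hnostop : ¬ (s.drop 0).take 3 ∈ pvStops := by rw [ha]; exact pvAtg_not_stop
      have hfs : pvFstop s 0 = pvFstop s 3 := by
        rw [pvFstop, if_pos h0, if_neg hnostop]
      rw [if_pos ha, if_pos ha, hfs]
      simp
    · rw [if_neg ha, if_neg ha]
      simp
  | succ k ih =>
    intro res hk
    have h3 : 3 * (k + 1) = 3 * k + 3 := by ring
    have hlt : 3 * k < s.length := by omega
    have hpos : 3 * (k + 1) < s.length := hk
    rw [pvBLoop]
    rw [if_neg (show ¬ 3 * (k + 1) = 0 by omega)]
    have hns : (if (s.drop (3 * (k + 1))).take 3 ∈ pvStops then 3 * (k + 1)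
        else pvFstop s (3 * (k + 1) + 3)) = pvFstop s (3 * (k + 1)) := by
      conv_rhs => rw [pvFstop, if_pos hpos]
    have harg : 3 * (k + 1) - 3 = 3 * k := by omega
    have harg2 : pvFstop s (3 * (k + 1)) = pvFstop s (3 * k + 3) := by rw [h3]
    rw [hns, harg, harg2]
    set res' := (if (s.drop (3 * (k + 1))).take 3 = ['A','T','G'] then
        res ++ [(s.drop (3 * (k + 1))).take (pvFstop s (3 * (k + 1) + 3) - 3 * (k + 1))]
      else res) with hres'
    have hres : res' = res ++ pvAt s (3 * (k + 1)) := by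
      rw [hres']
      unfold pvAt
      by_cases ha : (s.drop (3 * (k + 1))).take 3 = ['A','T','G']
      · have hnostop : ¬ (s.drop (3 * (k + 1))).take 3 ∈ pvStops := by
          rw [ha]; exact pvAtg_not_stop
        have hfs : pvFstop s (3 * (k + 1)) = pvFstop s (3 * (k + 1) + 3) := by
          conv_lhs => rw [pvFstop, if_pos hpos, if_neg hnostop]
        rw [if_pos ha, if_pos ha, ← hfs]
      · rw [if_neg ha, if_neg ha]; simp
    rw [ih res' hlt, hres]
    rw [show pvUpTo s (k + 1) = pvUpTo s k ++ pvAt s (3 * (k + 1)) from rfl]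
    simp [pvAt_reverse]

theorem pvUpTo_eq_from (s : List Char) :
    ∀ k : Nat, 3 * k < s.length → pvUpTo s k ++ pvFrom s (3 * k + 3) = pvFrom s 0 := by
  intro k
  induction k with
  | zero =>
    intro hk
    conv_rhs => rw [pvFrom, if_pos (show (0:Nat) < s.length by omega)]
    rw [show pvUpTo s 0 = pvAt s 0 from rfl]
  | succ k ih =>
    intro hk
    have hlt : 3 * k < s.length := by omega
    have h3 : 3 * (k + 1) = 3 * k + 3 := by ring
    have hstep : pvFrom s (3 * k + 3) = pvAt s (3 * (k + 1)) ++ pvFrom s (3 * (k + 1) + 3) := by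
      rw [pvFrom, if_pos (by omega), h3]
    rw [← ih hlt, hstep]
    rw [show pvUpTo s (k + 1) = pvUpTo s k ++ pvAt s (3 * (k + 1)) from rfl]
    simp

theorem one_frame_eq_from (seq : String) :
    one_frame seq = (pvFrom seq.toList 0).map (fun cs => String.ofList cs) := by
  rw [one_frame, pvALoop_eq]
  simp

theorem one_frame_alt_eq_from (seq : String) :
    one_frame_alt seq = (pvFrom seq.toList 0).map (fun cs => String.ofList cs) := by
  rw [one_frame_alt]
  by_cases h0 : seq.toList.length = 0
  · rw [if_pos h0, pvFrom, if_neg (by omega)]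
    simp
  · rw [if_neg h0]
    set s := seq.toList with hs
    set K := (s.length - 1) / 3 with hK
    have hKlt : 3 * K < s.length := by omega
    have hKtop : ¬ 3 * K + 3 < s.length := by omega
    have hmul : (s.length - 1) / 3 * 3 = 3 * K := by rw [hK]; ring
    have hns : s.length = pvFstop s (3 * K + 3) := (pvFstop_of_ge s _ hKtop).symm
    rw [hmul, hns, pvBLoop_eq s K [] hKlt]
    rw [List.nil_append, List.reverse_reverse]
    have : pvFrom s (3 * K + 3) = [] := by rw [pvFrom, if_neg hKtop]
    rw [← pvUpTo_eq_from s K hKlt, this, List.append_nil]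

-- ===== VERDICT (by name: the statement is the Claim_ definition above) =====
theorem one_frame_spec : Claim_equal_one_frame := by
  intro seq _
  unfold Spec_one_frame
  rw [one_frame_eq_from, one_frame_alt_eq_from]
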